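-- pv_equiv track=rewrite | github.com/ericcrn/ici | segundo-semestre/taller2.1/main.py | primero_segundo
-- ===== SOURCE A (Python) =====
-- def primero_segundo(lista):
--     list_primero_segundo = [[None, None, None, 0], [None, None, None, 0]]
--
--     for item in lista:
--         if item[3] > list_primero_segundo[0][3]:
--             list_primero_segundo[1] = list_primero_segundo[0]
--             list_primero_segundo[0] = item
--         elif item[3] > list_primero_segundo[1][3]:
--             list_primero_segundo[1] = item
--
--     return list_primero_segundo
-- ===== SOURCE B (Python) =====
-- def primero_segundo(lista):
--     positivos = [x for x in lista if x[3] > 0]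
--     top = sorted(positivos, key=lambda x: x[3], reverse=True)[:2]
--     return top + [[None, None, None, 0]] * (2 - len(top))
-- ===== Notes on version B (the rewrite author's own statement) =====
-- stated objective: simpler
-- what changed: Replaces A's streaming two-slot selection loop with filter-the-positives, stable descending sort by the fourth field, take the first two, and pad with the placeholder row.
import Mathlib
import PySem

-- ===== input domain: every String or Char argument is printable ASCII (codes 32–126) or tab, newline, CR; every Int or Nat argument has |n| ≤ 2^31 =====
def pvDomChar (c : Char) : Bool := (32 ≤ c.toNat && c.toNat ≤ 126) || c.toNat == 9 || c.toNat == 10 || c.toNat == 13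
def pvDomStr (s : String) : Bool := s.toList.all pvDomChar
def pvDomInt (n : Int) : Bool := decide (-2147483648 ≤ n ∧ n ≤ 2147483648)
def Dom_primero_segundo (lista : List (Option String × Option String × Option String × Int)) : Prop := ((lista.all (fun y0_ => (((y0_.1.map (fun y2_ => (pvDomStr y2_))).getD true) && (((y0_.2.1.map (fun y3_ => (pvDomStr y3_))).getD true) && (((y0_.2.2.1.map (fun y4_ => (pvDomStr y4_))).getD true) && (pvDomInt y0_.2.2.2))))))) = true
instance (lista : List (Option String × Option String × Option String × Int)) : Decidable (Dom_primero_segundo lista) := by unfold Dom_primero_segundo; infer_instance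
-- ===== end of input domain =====

-- B replaces A's streaming two-slot selection with filter-positives, stable descending
-- sort on the fourth field, take the first two, pad with the placeholder (simpler).

-- ===== PORT A =====
-- one iteration of A's for-loop: the two-element list of slots is the pair (first, second)
def pvStep (st : (Option String × Option String × Option String × Int) × (Option String × Option String × Option String × Int))
    (item : Option String × Option String × Option String × Int) :
    (Option String × Option String × Option String × Int) × (Option String × Option String × Option String × Int) :=
  if item.2.2.2 > st.1.2.2.2 then (item, st.1)
  else if item.2.2.2 > st.2.2.2.2 then (st.1, item)
  else st

def primero_segundo (lista : List (Option String × Option String × Option String × Int)) : List (Option String × Option String × Option String × Int) :=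
  let r := lista.foldl pvStep ((none, none, none, 0), (none, none, none, 0))
  [r.1, r.2]

-- ===== PORT B =====
-- the placeholder [None, None, None, 0]
def pvSent : Option String × Option String × Option String × Int := (none, none, none, 0)

def primero_segundo_alt (lista : List (Option String × Option String × Option String × Int)) : List (Option String × Option String × Option String × Int) :=
  let positivos := lista.filter (fun x => decide (x.2.2.2 > 0))
  -- sorted(positivos, key=lambda x: x[3], reverse=True)[:2]  ([:2] on a list is take 2, exact)
  let top := (PySem.List.sorted positivos (fun x => x.2.2.2) true).take 2
  -- top + [[None, None, None, 0]] * (2 - len(top)) ; len(top) ≤ 2, and Python's '*' on a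
  -- non-positive count gives [] exactly as Nat subtraction truncates at 0
  top ++ List.replicate (2 - top.length) pvSent

-- ===== PRECONDITION & SPEC =====
def Spec_primero_segundo (lista : List (Option String × Option String × Option String × Int)) (out : List (Option String × Option String × Option String × Int)) : Prop := out = primero_segundo_alt lista
instance (lista : List (Option String × Option String × Option String × Int)) (out : List (Option String × Option String × Option String × Int)) : Decidable (Spec_primero_segundo lista out) := by unfold Spec_primero_segundo; infer_instance

-- ===== CLAIM (what is proved, stated in full; the proofs are below) =====
def Claim_equal_primero_segundo : Prop := ∀ (lista : List (Option String × Option String × Option String × Int)), Dom_primero_segundo lista → Spec_primero_segundo lista (primero_segundo lista)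

-- ===== LEMMAS AND PROOFS =====

-- the pair (first slot, second slot) read off a descending list
def pvPairOf : List (Option String × Option String × Option String × Int) →
    (Option String × Option String × Option String × Int) × (Option String × Option String × Option String × Int)
  | [] => (pvSent, pvSent)
  | [a] => (a, pvSent)
  | a :: b :: _ => (a, b)

-- appending one element to the input inserts it into the stable descending sort
lemma pvSorted_snoc {α κ : Type} [LT κ] [DecidableLT κ] (p : List α) (x : α) (key : α → κ) :
    PySem.List.sorted (p ++ [x]) key true =
      PySem.List.insertBy (fun a b => decide (key b < key a)) x (PySem.List.sorted p key true) := by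
  rw [PySem.List.sorted_rev_eq_foldl_insertBy, PySem.List.sorted_rev_eq_foldl_insertBy,
    List.foldl_append]
  rfl

-- A's loop state after any prefix is the head pair of the sorted positive part
lemma pvInvariant (p : List (Option String × Option String × Option String × Int)) :
    p.foldl pvStep ((none, none, none, 0), (none, none, none, 0)) =
      pvPairOf (PySem.List.sorted (p.filter (fun x => decide (x.2.2.2 > 0))) (fun x => x.2.2.2) true) := by
  induction p using List.reverseRecOn with
  | nil => rfl
  | append_singleton p x ih =>
    have hpos : ∀ y ∈ PySem.List.sorted (p.filter (fun x => decide (x.2.2.2 > 0))) (fun x => x.2.2.2) true,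
        0 < y.2.2.2 := by
      intro y hy
      have := (PySem.List.mem_sorted _ _ _ _).mp hy
      simpa using (List.of_mem_filter this)
    have hpair : (PySem.List.sorted (p.filter (fun x => decide (x.2.2.2 > 0))) (fun x => x.2.2.2) true).Pairwise
        (fun a b => b.2.2.2 ≤ a.2.2.2) := PySem.List.sorted_pairwise_rev _ _
    rw [List.foldl_append, List.foldl_cons, List.foldl_nil, ih, List.filter_append]
    by_cases hx : 0 < x.2.2.2
    · simp only [List.filter_cons, List.filter_nil, decide_eq_true_eq, hx, if_pos, gt_iff_lt]
      rw [pvSorted_snoc]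
      set s := PySem.List.sorted (p.filter (fun x => decide (x.2.2.2 > 0))) (fun x => x.2.2.2) true with hs
      match s, hpos, hpair with
      | [], _, _ =>
        simp [PySem.List.insertBy, pvStep, pvPairOf, pvSent, hx]
      | [a], hpos, _ =>
        have ha : 0 < a.2.2.2 := hpos a (by simp)
        by_cases h1 : a.2.2.2 < x.2.2.2
        · simp [PySem.List.insertBy, pvStep, pvPairOf, pvSent, h1]
        · simp only [PySem.List.insertBy, decide_eq_true_eq, h1, if_neg, not_false_iff]
          simp [pvStep, pvPairOf, pvSent, h1, hx]
      | a :: b :: t, hpos, hpair =>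
        have hba : b.2.2.2 ≤ a.2.2.2 := (List.pairwise_cons.mp hpair).1 b (by simp)
        have hb : 0 < b.2.2.2 := hpos b (by simp)
        by_cases h1 : a.2.2.2 < x.2.2.2
        · simp [PySem.List.insertBy, pvStep, pvPairOf, h1]
        · by_cases h2 : b.2.2.2 < x.2.2.2
          · simp only [PySem.List.insertBy, decide_eq_true_eq, h1, h2, if_neg, if_pos,
              not_false_iff]
            simp [pvStep, pvPairOf, h2, not_lt.mp h1]
          · simp only [PySem.List.insertBy, decide_eq_true_eq, h1, h2, if_neg, not_false_iff]
            simp [pvStep, pvPairOf, h1, h2]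
    · have hxf : (decide (x.2.2.2 > 0)) = false := by simpa using hx
      simp only [List.filter_cons, List.filter_nil, hxf, List.append_nil, Bool.false_eq_true,
        if_neg, not_false_iff]
      set s := PySem.List.sorted (p.filter (fun x => decide (x.2.2.2 > 0))) (fun x => x.2.2.2) true with hs
      match s, hpos with
      | [], _ =>
        have h0 : ¬ x.2.2.2 > (0:Int) := hx
        simp [pvStep, pvPairOf, pvSent, h0]
      | [a], hpos =>
        have ha : 0 < a.2.2.2 := hpos a (by simp)
        have h0 : ¬ x.2.2.2 > (0:Int) := hx
        have h1 : ¬ x.2.2.2 > a.2.2.2 := by omega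
        simp [pvStep, pvPairOf, pvSent, h0, h1]
      | a :: b :: t, hpos =>
        have ha : 0 < a.2.2.2 := hpos a (by simp)
        have hb : 0 < b.2.2.2 := hpos b (by simp)
        have h1 : ¬ x.2.2.2 > a.2.2.2 := by omega
        have h2 : ¬ x.2.2.2 > b.2.2.2 := by omega
        simp [pvStep, pvPairOf, h1, h2]

-- take-2-and-pad of a list equals the two components of its head pair
lemma pvPad (s : List (Option String × Option String × Option String × Int)) :
    (s.take 2) ++ List.replicate (2 - (s.take 2).length) pvSent = [(pvPairOf s).1, (pvPairOf s).2] := by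
  match s with
  | [] => rfl
  | [a] => rfl
  | a :: b :: t => rfl

-- ===== VERDICT (by name: the statement is the Claim_ definition above) =====
theorem primero_segundo_spec : Claim_equal_primero_segundo := by
  intro lista _
  show _ = _
  rw [primero_segundo, primero_segundo_alt]
  simp only [pvInvariant, pvPad]
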